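-- pv_equiv track=rewrite | github.com/Thoufeek9495/RoyalWinAI_Kivy | ai_coach_app.py | simulate_entropy
-- ===== SOURCE A (Python) =====
-- def classify_odd_even(num):
--     return "Odd" if num % 2 != 0 else "Even"
--
-- def simulate_entropy(data):
--     if len(data) < 10:
--         return "Even", 50
--     chunks = [data[i:i+5] for i in range(0, len(data)-4)]
--     odd_runs = sum(1 for chunk in chunks if all(classify_odd_even(x) == "Odd" for x in chunk))
--     even_runs = sum(1 for chunk in chunks if all(classify_odd_even(x) == "Even" for x in chunk))
--     if odd_runs > even_runs:
--         return "Even", 55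
--     elif even_runs > odd_runs:
--         return "Odd", 55
--     return classify_odd_even(data[-1]), 50
-- ===== SOURCE B (Python) =====
-- def simulate_entropy(data):
--     if len(data) < 10:
--         return "Even", 50
--     odd_run = even_run = 0
--     odd_windows = even_windows = 0
--     for x in data:
--         if x % 2 != 0:
--             odd_run += 1
--             even_run = 0
--             if odd_run >= 5:
--                 odd_windows += 1
--         else:
--             even_run += 1
--             odd_run = 0
--             if even_run >= 5:
--                 even_windows += 1
--     if odd_windows > even_windows:
--         return "Even", 55
--     if even_windows > odd_windows:
--         return "Odd", 55
--     return ("Odd" if data[-1] % 2 != 0 else "Even"), 50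
-- ===== Notes on version B (the rewrite author's own statement) =====
-- stated objective: faster
-- what changed: Replaces A's materialisation of all length-5 slices plus two full scans over them (quadratic work per element) with a single pass that maintains the current odd/even streak lengths and counts a window whenever a streak reaches 5.
import Mathlib
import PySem

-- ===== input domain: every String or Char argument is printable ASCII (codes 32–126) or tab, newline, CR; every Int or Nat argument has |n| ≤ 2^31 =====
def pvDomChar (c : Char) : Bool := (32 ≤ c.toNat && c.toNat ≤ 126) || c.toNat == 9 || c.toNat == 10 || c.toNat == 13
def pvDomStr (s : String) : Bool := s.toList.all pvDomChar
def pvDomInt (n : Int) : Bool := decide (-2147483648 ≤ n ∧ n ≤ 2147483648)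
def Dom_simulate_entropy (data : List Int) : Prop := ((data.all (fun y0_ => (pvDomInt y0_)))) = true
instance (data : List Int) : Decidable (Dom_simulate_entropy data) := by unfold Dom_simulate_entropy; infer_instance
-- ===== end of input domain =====

-- B replaces A's list-of-slices plus two scans by one streak-counting pass; equal return value on all inputs.


-- ===== PORT A =====
def classify_odd_even (num : Int) : String :=
  if PySem.Int.mod num 2 ≠ 0 then "Odd" else "Even"

def simulate_entropy (data : List Int) : String × Int :=
  if PySem.List.len data < 10 then ("Even", 50)
  else
    let chunks := (PySem.List.pyRange 0 (PySem.List.len data - 4) 1).map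
      (fun i => PySem.List.slice data (some i) (some (i + 5)))
    let odd_runs : Int := chunks.foldl
      (fun acc chunk => if chunk.all (fun x => classify_odd_even x == "Odd") then acc + 1 else acc) 0
    let even_runs : Int := chunks.foldl
      (fun acc chunk => if chunk.all (fun x => classify_odd_even x == "Even") then acc + 1 else acc) 0
    if odd_runs > even_runs then ("Even", 55)
    else if even_runs > odd_runs then ("Odd", 55)
    else (classify_odd_even (PySem.List.pyGetD data (-1) 0), 50)

-- ===== PORT B =====
-- the loop body of Source B: state = (odd_run, even_run, odd_windows, even_windows)
def simulate_entropy_step (s : Int × Int × Int × Int) (x : Int) : Int × Int × Int × Int :=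
  match s with
  | (odd_run, even_run, odd_windows, even_windows) =>
    if PySem.Int.mod x 2 ≠ 0 then
      (odd_run + 1, 0, if odd_run + 1 ≥ 5 then odd_windows + 1 else odd_windows, even_windows)
    else
      (0, even_run + 1, odd_windows, if even_run + 1 ≥ 5 then even_windows + 1 else even_windows)

def simulate_entropy_alt (data : List Int) : String × Int :=
  if PySem.List.len data < 10 then ("Even", 50)
  else
    let st := data.foldl simulate_entropy_step (0, 0, 0, 0)
    if st.2.2.1 > st.2.2.2 then ("Even", 55)
    else if st.2.2.2 > st.2.2.1 then ("Odd", 55)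
    else ((if PySem.Int.mod (PySem.List.pyGetD data (-1) 0) 2 ≠ 0 then "Odd" else "Even"), 50)

-- ===== PRECONDITION & SPEC =====
def Spec_simulate_entropy (data : List Int) (out : String × Int) : Prop := out = simulate_entropy_alt data
instance (data : List Int) (out : String × Int) : Decidable (Spec_simulate_entropy data out) := by unfold Spec_simulate_entropy; infer_instance

-- ===== CLAIM (what is proved, stated in full; the proofs are below) =====
def Claim_equal_simulate_entropy : Prop := ∀ (data : List Int), Dom_simulate_entropy data → Spec_simulate_entropy data (simulate_entropy data)

-- ===== LEMMAS AND PROOFS =====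

-- Bool parity predicates
def pvOddb (x : Int) : Bool := decide (PySem.Int.mod x 2 ≠ 0)
def pvEvb (x : Int) : Bool := !pvOddb x

-- length of the maximal suffix of l all of whose elements satisfy p
def pvSfx (p : Int → Bool) (l : List Int) : Nat := (l.reverse.takeWhile p).length

-- number of 5-windows of l all of whose elements satisfy p
def pvWin (p : Int → Bool) (l : List Int) : Nat :=
  (List.range (l.length - 4)).countP (fun k => ((l.drop k).take 5).all p)

lemma pvClassify_odd (x : Int) : (classify_odd_even x == "Odd") = pvOddb x := by
  unfold classify_odd_even pvOddb
  by_cases h : PySem.Int.mod x 2 ≠ 0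
  · rw [if_pos h, decide_eq_true h]; decide
  · rw [if_neg h, decide_eq_false h]; decide

lemma pvClassify_even (x : Int) : (classify_odd_even x == "Even") = pvEvb x := by
  unfold classify_odd_even pvEvb pvOddb
  by_cases h : PySem.Int.mod x 2 ≠ 0
  · rw [if_pos h, decide_eq_true h]; decide
  · rw [if_neg h, decide_eq_false h]; decide

lemma pvSfx_append (p : Int → Bool) (l : List Int) (x : Int) :
    pvSfx p (l ++ [x]) = if p x then pvSfx p l + 1 else 0 := by
  unfold pvSfx
  rw [List.reverse_append]
  by_cases h : p x <;> simp [h]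

lemma pvSfx_le (p : Int → Bool) (l : List Int) : pvSfx p l ≤ l.length := by
  unfold pvSfx
  calc (l.reverse.takeWhile p).length ≤ l.reverse.length :=
        (List.takeWhile_sublist _).length_le
    _ = l.length := List.length_reverse

lemma pvTake_all_iff (p : Int → Bool) (xs : List Int) (k : Nat) (h : k ≤ xs.length) :
    (xs.take k).all p = true ↔ k ≤ (xs.takeWhile p).length := by
  induction xs generalizing k with
  | nil =>
    simp only [List.length_nil, Nat.le_zero] at h
    subst h; simp
  | cons y ys ih =>
    cases k with
    | zero => simp
    | succ k =>
      by_cases hp : p y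
      · simp only [List.take_succ_cons, List.all_cons, hp, Bool.true_and,
          List.takeWhile_cons_of_pos hp, List.length_cons]
        rw [ih k (by simpa using h)]
        omega
      · simp [hp, List.takeWhile_cons_of_neg hp]

lemma pvDrop_all_iff (p : Int → Bool) (l : List Int) (h : 4 ≤ l.length) :
    (l.drop (l.length - 4)).all p = true ↔ 4 ≤ pvSfx p l := by
  have hrev : l.reverse.take 4 = (l.drop (l.length - 4)).reverse := List.take_reverse
  have := pvTake_all_iff p l.reverse 4 (by simpa using h)
  rw [hrev] at this
  simpa [pvSfx, List.all_reverse] using this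

lemma pvWin_append (p : Int → Bool) (l : List Int) (x : Int) :
    pvWin p (l ++ [x]) = pvWin p l + (if 5 ≤ pvSfx p (l ++ [x]) then 1 else 0) := by
  unfold pvWin
  by_cases h : l.length ≤ 3
  · have h1 : (l ++ [x]).length - 4 = 0 := by simp; omega
    have h2 : l.length - 4 = 0 := by omega
    have h3 : pvSfx p (l ++ [x]) ≤ l.length + 1 := by
      simpa using pvSfx_le p (l ++ [x])
    rw [h1, h2, if_neg (by omega)]
    simp
  · have h : 4 ≤ l.length := by omega
    have h4 : 4 ≤ l.length := h
    have hlen : (l ++ [x]).length - 4 = (l.length - 4) + 1 := by simp; omega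
    rw [hlen, List.range_succ, List.countP_append]
    have hfirst : (List.range (l.length - 4)).countP
        (fun k => (((l ++ [x]).drop k).take 5).all p)
        = (List.range (l.length - 4)).countP (fun k => ((l.drop k).take 5).all p) := by
      apply List.countP_congr
      intro k hk
      rw [List.mem_range] at hk
      have hk1 : k ≤ l.length := by omega
      have hk2 : 5 ≤ (l.drop k).length := by simp; omega
      rw [List.drop_append_of_le_length hk1, List.take_append_of_le_length hk2]
    rw [hfirst]
    congr 1
    -- the new window, ending at x
    have hd : (l ++ [x]).drop (l.length - 4) = l.drop (l.length - 4) ++ [x] :=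
      List.drop_append_of_le_length (by omega)
    have hlen5 : (l.drop (l.length - 4) ++ [x]).length = 5 := by simp; omega
    have ht : ((l ++ [x]).drop (l.length - 4)).take 5 = l.drop (l.length - 4) ++ [x] := by
      rw [hd, List.take_of_length_le (by omega)]
    rw [List.countP_singleton, ht]
    rw [pvSfx_append]
    by_cases hp : p x
    · simp only [List.all_append, List.all_cons, List.all_nil, Bool.and_true, hp, if_pos]
      by_cases hall : (l.drop (l.length - 4)).all p = true
      · rw [if_pos hall]
        rw [if_pos (by have := (pvDrop_all_iff p l h4).mp hall; omega)]
      · rw [if_neg (by simpa using hall)]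
        rw [if_neg (by
          intro hc
          exact hall ((pvDrop_all_iff p l h4).mpr (by omega)))]
    · have hpf : p x = false := by simpa using hp
      have hall : (l.drop (l.length - 4) ++ [x]).all p = false := by
        simp [List.all_append, hpf]
      rw [hall, if_neg hp]
      simp
    
lemma pvFoldB_spec (l : List Int) :
    l.foldl simulate_entropy_step (0, 0, 0, 0)
      = ((pvSfx pvOddb l : Int), (pvSfx pvEvb l : Int), (pvWin pvOddb l : Int), (pvWin pvEvb l : Int)) := by
  induction l using List.reverseRecOn with
  | nil => simp [pvSfx, pvWin]
  | append_singleton l x ih =>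
    rw [List.foldl_append, ih, List.foldl_cons, List.foldl_nil]
    simp only [simulate_entropy_step]
    rw [pvSfx_append, pvSfx_append, pvWin_append, pvWin_append, pvSfx_append, pvSfx_append]
    by_cases hm : PySem.Int.mod x 2 ≠ 0
    · have ho : pvOddb x = true := decide_eq_true hm
      have he : pvEvb x = false := by unfold pvEvb; rw [ho]; rfl
      rw [if_pos hm]
      simp only [ho, he, if_true, Bool.false_eq_true, if_false, Nat.cast_zero]
      simp only [Prod.mk.injEq]
      repeat' apply And.intro
      all_goals first
        | (split_ifs <;> push_cast <;> omega)
        | (push_cast; omega)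
        | trivial
    · have ho : pvOddb x = false := decide_eq_false hm
      have he : pvEvb x = true := by unfold pvEvb; rw [ho]; rfl
      rw [if_neg hm]
      simp only [ho, he, if_true, Bool.false_eq_true, if_false, Nat.cast_zero]
      simp only [Prod.mk.injEq]
      repeat' apply And.intro
      all_goals first
        | (split_ifs <;> push_cast <;> omega)
        | (push_cast; omega)
        | trivial

lemma pvChunks_eq (data : List Int) (h : 10 ≤ data.length) :
    (PySem.List.pyRange 0 (PySem.List.len data - 4) 1).map
        (fun i => PySem.List.slice data (some i) (some (i + 5)))
      = (List.range (data.length - 4)).map (fun k => (data.drop k).take 5) := by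
  rw [PySem.List.len_eq, PySem.List.pyRange_one, List.map_map]
  have hn : ((data.length : Int) - 4 - 0).toNat = data.length - 4 := by omega
  rw [hn]
  apply List.map_congr_left
  intro k hk
  simp only [Function.comp_apply, zero_add]
  have := PySem.List.slice_natCast_add data k 5
  push_cast at this
  exact this

lemma pvCountA (data : List Int) (p : Int → Bool) :
    ((List.range (data.length - 4)).map (fun k => (data.drop k).take 5)).foldl
      (fun acc chunk => if chunk.all p then acc + 1 else acc) (0 : Int)
      = (pvWin p data : Int) := by
  rw [PySem.List.foldl_count_if, List.countP_map]
  unfold pvWin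
  simp [Function.comp_def]

-- ===== VERDICT (by name: the statement is the Claim_ definition above) =====
theorem simulate_entropy_spec : Claim_equal_simulate_entropy := by
  intro data _
  unfold Spec_simulate_entropy simulate_entropy simulate_entropy_alt
  by_cases h : PySem.List.len data < 10
  · rw [if_pos h, if_pos h]
  · rw [if_neg h, if_neg h]
    have h10 : 10 ≤ data.length := by
      rw [PySem.List.len_eq] at h; omega
    simp only [pvClassify_odd, pvClassify_even]
    rw [pvChunks_eq data h10, pvCountA data pvOddb, pvCountA data pvEvb, pvFoldB_spec]
    rfl
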